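-- pv_equiv track=rewrite | github.com/ianyang66/TruffleHogSpider | truffleHogSpider.py | get_strings_of_set
-- ===== SOURCE A (Python) =====
-- def get_strings_of_set(word, char_set, threshold=20):
--     count = 0
--     strings = []
--     letters = ""
--     for char in word:
--         if char in char_set:
--             letters += char
--             count += 1
--         else:
--             if count > threshold:
--                 strings.append(letters)
--             letters = ""
--             count = 0
--     if count > threshold:
--         strings.append(letters)
--     return strings
-- ===== SOURCE B (Python) =====
-- def get_strings_of_set(word, char_set, threshold=20):
--     # Two staged passes over indices: collect the positions that cut the word
--     # (every index holding a non-member character, plus sentinels -1 and len),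
--     # then slice the word between consecutive cuts and keep the long slices.
--     cuts = [-1] + [i for i, ch in enumerate(word) if ch not in char_set] + [len(word)]
--     return [word[a + 1:b] for a, b in zip(cuts, cuts[1:]) if b - a - 1 > threshold]
-- ===== Notes on version B (the rewrite author's own statement) =====
-- stated objective: alternative
-- what changed: B computes the list of cut positions (indices of non-member characters plus sentinels -1 and len) in a first pass, then produces each maximal run by slicing the word between consecutive cut positions and keeps slices longer than the threshold; no character accumulator or counter is maintained.
import Mathlib
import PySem

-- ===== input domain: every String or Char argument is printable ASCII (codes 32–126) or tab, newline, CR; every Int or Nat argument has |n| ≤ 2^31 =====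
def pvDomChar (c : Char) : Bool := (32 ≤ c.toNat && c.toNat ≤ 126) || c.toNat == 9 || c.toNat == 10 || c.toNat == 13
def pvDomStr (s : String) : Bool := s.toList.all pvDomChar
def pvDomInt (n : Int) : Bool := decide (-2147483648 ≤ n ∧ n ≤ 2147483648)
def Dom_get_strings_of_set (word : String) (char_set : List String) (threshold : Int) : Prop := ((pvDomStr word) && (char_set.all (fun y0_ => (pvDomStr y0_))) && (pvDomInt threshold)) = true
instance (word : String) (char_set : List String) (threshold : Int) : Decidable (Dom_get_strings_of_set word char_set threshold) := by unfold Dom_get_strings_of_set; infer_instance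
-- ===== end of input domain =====

-- B replaces A's counting accumulator scan by two staged passes: collect the cut
-- positions (indices of non-member characters plus sentinels -1 and len), then slice
-- the word between consecutive cuts and keep the long slices ('alternative').

-- ===== PORT A =====
-- state = (count, strings, letters); strings/letters as List Char (PySem.Chars convention)
def pvStepA (char_set : List String) (threshold : Int)
    (st : Int × List (List Char) × List Char) (c : Char) : Int × List (List Char) × List Char :=
  let (count, strings, letters) := st
  if char_set.contains (String.ofList [c]) then
    (count + 1, strings, letters ++ [c])
  else
    (0, if count > threshold then strings ++ [letters] else strings, [])

def get_strings_of_set (word : String) (char_set : List String) (threshold : Int) : List String :=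
  let st := word.toList.foldl (pvStepA char_set threshold) (0, [], [])
  (if st.1 > threshold then st.2.1 ++ [st.2.2] else st.2.1).map (fun l => String.ofList l)

-- ===== PORT B =====
-- cuts = [-1] + [i for i, ch in enumerate(word) if ch not in char_set] + [len(word)]
-- return [word[a+1:b] for a, b in zip(cuts, cuts[1:]) if b - a - 1 > threshold]
def get_strings_of_set_alt (word : String) (char_set : List String) (threshold : Int) : List String :=
  let l := word.toList
  let cuts : List Int :=
    [-1] ++ ((PySem.List.enumerate l 0).filter
              (fun p => !(char_set.contains (String.ofList [p.2])))).map (fun p => p.1)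
         ++ [(l.length : Int)]
  ((cuts.zip cuts.tail).filter (fun p => p.2 - p.1 - 1 > threshold)).map
    (fun p => String.ofList (PySem.List.slice l (some (p.1 + 1)) (some p.2)))

-- ===== PRECONDITION & SPEC =====
def Spec_get_strings_of_set (word : String) (char_set : List String) (threshold : Int) (out : List String) : Prop := out = get_strings_of_set_alt word char_set threshold
instance (word : String) (char_set : List String) (threshold : Int) (out : List String) : Decidable (Spec_get_strings_of_set word char_set threshold out) := by unfold Spec_get_strings_of_set; infer_instance

-- ===== CLAIM (what is proved, stated in full; the proofs are below) =====
def Claim_equal_get_strings_of_set : Prop := ∀ (word : String) (char_set : List String) (threshold : Int), Dom_get_strings_of_set word char_set threshold → Spec_get_strings_of_set word char_set threshold (get_strings_of_set word char_set threshold)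

-- ===== LEMMAS AND PROOFS =====

-- Proof-side split into maximal runs (empty pieces kept), recursive form.
def pvRuns (cs : List String) : List Char → List (List Char)
  | [] => [[]]
  | c :: l =>
    if cs.contains (String.ofList [c]) then
      match pvRuns cs l with
      | [] => [[c]]
      | h :: t => (c :: h) :: t
    else [] :: pvRuns cs l

theorem pvRuns_ne_nil (cs : List String) (l : List Char) : pvRuns cs l ≠ [] := by
  cases l with
  | nil => simp [pvRuns]
  | cons c l =>
    simp only [pvRuns]
    split
    · split <;> simp
    · simp

-- Proof-side fold (split at non-members, keep empties), relating A's loop to pvRuns.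
def pvStepB (cs : List String)
    (st : List (List Char) × List Char) (c : Char) : List (List Char) × List Char :=
  let (pieces, cur) := st
  if cs.contains (String.ofList [c]) then (pieces, cur ++ [c])
  else (pieces ++ [cur], [])

def pvConsHead (cur : List Char) : List (List Char) → List (List Char)
  | [] => [cur]
  | h :: t => (cur ++ h) :: t

-- A's loop invariant: collected strings are the finished pieces filtered by length.
theorem pv_loop_eq (cs : List String) (t : Int) (l : List Char) :
    ∀ (strings pieces : List (List Char)) (cur : List Char) (count : Int),
    count = (cur.length : Int) → strings = pieces.filter (fun p => (p.length : Int) > t) →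
    (let st := l.foldl (pvStepA cs t) (count, strings, cur)
     if st.1 > t then st.2.1 ++ [st.2.2] else st.2.1)
    = (let st := l.foldl (pvStepB cs) (pieces, cur)
       (st.1 ++ [st.2]).filter (fun p => (p.length : Int) > t)) := by
  induction l with
  | nil =>
    intro strings pieces cur count hc hs
    simp only [List.foldl_nil, List.filter_append, List.filter_cons, List.filter_nil]
    subst hc hs
    by_cases h : ((cur.length : Int) > t) <;> simp [h]
  | cons c l ih =>
    intro strings pieces cur count hc hs
    by_cases h : cs.contains (String.ofList [c])
    · simp only [List.foldl_cons, pvStepA, pvStepB, h, if_true]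
      exact ih _ _ _ _ (by simp [hc]) hs
    · simp only [List.foldl_cons, pvStepA, pvStepB, h, Bool.false_eq_true, if_false]
      refine ih _ _ _ _ (by simp) ?_
      subst hc hs
      by_cases hlen : ((cur.length : Int) > t) <;>
        simp [List.filter_append, hlen]

-- B's fold-split equals the recursive pvRuns (generalized over the accumulator).
theorem pv_fold_runs (cs : List String) (l : List Char) :
    ∀ (pieces : List (List Char)) (cur : List Char),
    (let st := l.foldl (pvStepB cs) (pieces, cur); st.1 ++ [st.2])
    = pieces ++ pvConsHead cur (pvRuns cs l) := by
  induction l with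
  | nil => intro pieces cur; simp [pvRuns, pvConsHead]
  | cons c l ih =>
    intro pieces cur
    by_cases h : cs.contains (String.ofList [c])
    · simp only [List.foldl_cons, pvStepB, h, if_true, pvRuns]
      rw [ih]
      rcases hr : pvRuns cs l with _ | ⟨hd, tl⟩
      · exact absurd hr (pvRuns_ne_nil cs l)
      · simp [pvConsHead]
    · simp only [List.foldl_cons, pvStepB, h, Bool.false_eq_true, if_false, pvRuns]
      rw [ih]
      rcases hr : pvRuns cs l with _ | ⟨hd, tl⟩
      · exact absurd hr (pvRuns_ne_nil cs l)
      · simp [pvConsHead]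

-- Cut positions (B's first pass) and the consecutive-pair list, proof-side names.
def pvNm (cs : List String) (l : List Char) : List Int :=
  ((PySem.List.enumerate l 0).filter
    (fun p => !(cs.contains (String.ofList [p.2])))).map (fun p => p.1)

def pvCuts (cs : List String) (l : List Char) : List Int :=
  -1 :: (pvNm cs l ++ [(l.length : Int)])

def pvPairs (cs : List String) (l : List Char) : List (Int × Int) :=
  (pvCuts cs l).zip (pvCuts cs l).tail

theorem pv_enum_shift {α : Type} (l : List α) (s : Int) :
    PySem.List.enumerate l (s + 1) = (PySem.List.enumerate l s).map (fun p => (p.1 + 1, p.2)) := by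
  induction l generalizing s with
  | nil => simp [PySem.List.enumerate_nil]
  | cons x l ih =>
    rw [PySem.List.enumerate_cons, PySem.List.enumerate_cons, List.map_cons, ih (s + 1)]

theorem pvNm_cons (cs : List String) (c : Char) (l : List Char) :
    pvNm cs (c :: l)
      = (if cs.contains (String.ofList [c]) then [] else [0]) ++ (pvNm cs l).map (· + 1) := by
  unfold pvNm
  have he : PySem.List.enumerate (c :: l) 0
      = (0, c) :: (PySem.List.enumerate l 0).map (fun p => (p.1 + 1, p.2)) := by
    rw [PySem.List.enumerate_cons, show (0 : Int) + 1 = 0 + 1 from rfl, pv_enum_shift]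
  rw [he, List.filter_cons, List.filter_map]
  by_cases h : String.ofList [c] ∈ cs <;>
    simp [h, List.contains_eq_mem, Function.comp_def, List.map_map]

theorem pv_nm_nonneg (cs : List String) (l : List Char) :
    ∀ x ∈ pvNm cs l, 0 ≤ x := by
  intro x hx
  unfold pvNm at hx
  obtain ⟨p, hp, rfl⟩ := List.mem_map.1 hx
  have hp' := List.mem_of_mem_filter hp
  obtain ⟨k, hk, rfl⟩ := (PySem.List.mem_enumerate_iff _ _ _).1 hp'
  simp

theorem pv_pairs_bounds (cs : List String) (l : List Char) :
    ∀ p ∈ pvPairs cs l, -1 ≤ p.1 ∧ 0 ≤ p.2 := by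
  rintro ⟨a, b⟩ hp
  obtain ⟨ha, hb⟩ := List.of_mem_zip hp
  simp only [pvCuts, List.tail_cons, List.mem_cons, List.mem_append] at ha hb
  constructor
  · rcases ha with rfl | h | rfl | h
    · omega
    · have := pv_nm_nonneg cs l _ h; omega
    · omega
    · simp at h
  · rcases hb with h | rfl | h
    · exact pv_nm_nonneg cs l _ h
    · omega
    · simp at h

theorem pv_slice_shift (c : Char) (l : List Char) (a b : Int) (ha : -1 ≤ a) (hb : 0 ≤ b) :
    PySem.List.slice (c :: l) (some (a + 1 + 1)) (some (b + 1))
      = PySem.List.slice l (some (a + 1)) (some b) := by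
  have e1 := PySem.List.slice_toNat (c :: l) (a := a + 1 + 1) (b := b + 1) (by omega) (by omega)
  have e2 := PySem.List.slice_toNat l (a := a + 1) (b := b) (by omega) hb
  rw [e1, e2]
  have h1 : (a + 1 + 1).toNat = (a + 1).toNat + 1 := by omega
  rw [h1, List.drop_succ_cons]
  congr 1
  omega

-- Main correspondence: length and slice over consecutive cuts = the runs with their lengths.
theorem pv_pairs_runs (cs : List String) (l : List Char) :
    (pvPairs cs l).map
        (fun p => (p.2 - p.1 - 1, PySem.List.slice l (some (p.1 + 1)) (some p.2)))
      = (pvRuns cs l).map (fun r => ((r.length : Int), r)) := by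
  induction l with
  | nil =>
    have h0 : PySem.List.slice ([] : List Char) none (some (0 : Int)) = [] := by
      rw [PySem.List.slice_to ([] : List Char) (b := (0 : Int)) (by omega)]; simp
    simp [pvPairs, pvCuts, pvNm, PySem.List.enumerate_nil, pvRuns, h0]
  | cons c l ih =>
    have hlen : (((c :: l).length : Int)) = (l.length : Int) + 1 := by
      push_cast [List.length_cons]; ring
    by_cases h : cs.contains (String.ofList [c])
    · -- member character: every cut of l shifts by one, the first run grows by c
      rcases hrest : pvNm cs l ++ [((l.length : Int))] with _ | ⟨r0, rt⟩
      · exact absurd hrest (by simp)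
      have hcuts : pvCuts cs (c :: l) = -1 :: (r0 + 1) :: rt.map (fun x => x + 1) := by
        rw [pvCuts, pvNm_cons, if_pos h, List.nil_append, hlen]
        have hmm : (pvNm cs l).map (· + 1) ++ [(l.length : Int) + 1]
            = (pvNm cs l ++ [(l.length : Int)]).map (fun x => x + 1) := by simp
        rw [hmm, hrest]; simp
      have hpl : pvPairs cs l = (-1, r0) :: (r0 :: rt).zip rt := by
        simp [pvPairs, pvCuts, hrest]
      have hpcl : pvPairs cs (c :: l)
          = (-1, r0 + 1)
            :: ((r0 :: rt).zip rt).map (Prod.map (fun x => x + 1) (fun x => x + 1)) := by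
        rw [pvPairs, hcuts]
        simp only [List.tail_cons, List.zip_cons_cons]
        have hm : (r0 + 1) :: rt.map (fun x => x + 1)
            = (r0 :: rt).map (fun x => x + 1) := by simp
        rw [hm, List.zip_map]
      rw [hpl] at ih
      rcases hr : pvRuns cs l with _ | ⟨hd, tl⟩
      · exact absurd hr (pvRuns_ne_nil cs l)
      rw [hr] at ih
      simp only [List.map_cons] at ih
      have ihead := List.head_eq_of_cons_eq ih
      have itail := List.tail_eq_of_cons_eq ih
      have hr0 : r0 = (hd.length : Int) := by
        have := congrArg Prod.fst ihead; simpa using this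
      have hslice : PySem.List.slice l (some ((-1 : Int) + 1)) (some r0) = hd := by
        have := congrArg Prod.snd ihead; simpa using this
      have hruns : pvRuns cs (c :: l) = (c :: hd) :: tl := by
        simp only [pvRuns, hr]; rw [if_pos h]
      rw [hpcl, hruns, List.map_cons, List.map_cons]
      congr 1
      · -- head pair
        have hslice' : List.take hd.length l = hd := by
          rw [show ((-1 : Int) + 1) = ((0 : Nat) : Int) from by norm_num,
              hr0, show ((hd.length : Int)) = ((hd.length : Nat) : Int) from rfl,
              PySem.List.slice_natCast] at hslice
          simpa using hslice
        refine Prod.ext ?_ ?_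
        · simp only; push_cast [List.length_cons]; omega
        · simp only
          rw [show ((-1 : Int) + 1) = ((0 : Nat) : Int) from by norm_num,
              show r0 + 1 = (((hd.length + 1 : Nat)) : Int) from by push_cast; omega,
              PySem.List.slice_natCast]
          simpa [List.take_succ_cons] using congrArg (List.cons c) hslice'
      · -- shifted tail pairs
        rw [List.map_map, ← itail]
        apply List.map_congr_left
        intro p hpmem
        have hb : -1 ≤ p.1 ∧ 0 ≤ p.2 := by
          apply pv_pairs_bounds cs l
          rw [hpl]; exact List.mem_cons_of_mem _ hpmem
        rcases p with ⟨a, b⟩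
        simp only [Function.comp_apply, Prod.map_apply]
        refine Prod.ext ?_ ?_
        · simp only; ring
        · simpa using pv_slice_shift c l a b hb.1 hb.2
    · -- non-member character: a new cut at position 0, everything else shifts by one
      have hcuts : pvCuts cs (c :: l) = -1 :: (pvCuts cs l).map (fun x => x + 1) := by
        rw [pvCuts, pvNm_cons, if_neg h, hlen]
        simp [pvCuts]
      have hpcl : pvPairs cs (c :: l)
          = (-1, 0) :: (pvPairs cs l).map (Prod.map (fun x => x + 1) (fun x => x + 1)) := by
        rw [pvPairs, hcuts]
        conv_lhs => rw [pvCuts]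
        simp only [List.map_cons, List.tail_cons, List.zip_cons_cons]
        have h1 : ((-1 : Int) + 1) = 0 := by norm_num
        have h2 : (pvNm cs l ++ [(l.length : Int)]).map (fun x => x + 1)
            = ((pvCuts cs l).tail).map (fun x => x + 1) := by simp [pvCuts]
        have h3 : (0 : Int) :: ((pvCuts cs l).tail).map (fun x => x + 1)
            = (pvCuts cs l).map (fun x => x + 1) := by simp [pvCuts]
        rw [h1, h2, h3, List.zip_map]
        rfl
      have hruns : pvRuns cs (c :: l) = [] :: pvRuns cs l := by
        simp only [pvRuns]; rw [if_neg h]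
      rw [hpcl, hruns, List.map_cons, List.map_cons]
      -- the head pair (0, []) is definitional; only the shifted tail remains
      congr 1
      rw [List.map_map, ← ih]
      apply List.map_congr_left
      intro p hpmem
      have hb := pv_pairs_bounds cs l p hpmem
      rcases p with ⟨a, b⟩
      simp only [Function.comp_apply, Prod.map_apply]
      refine Prod.ext ?_ ?_
      · simp only; ring
      · simpa using pv_slice_shift c l a b hb.1 hb.2

-- ===== VERDICT (by name: the statement is the Claim_ definition above) =====
theorem get_strings_of_set_spec : Claim_equal_get_strings_of_set := by
  intro word cs t _
  unfold Spec_get_strings_of_set get_strings_of_set get_strings_of_set_alt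
  set l := word.toList with hl
  -- A's result, via the loop invariant and the fold-to-runs characterization
  have hA := pv_loop_eq cs t l [] [] [] 0 (by simp) (by simp)
  have hF := pv_fold_runs cs l [] []
  simp only at hA hF
  -- B's result, via the cuts-pairs correspondence
  have hP := pv_pairs_runs cs l
  have hcuts : [-1] ++ ((PySem.List.enumerate l 0).filter
        (fun p => !(cs.contains (String.ofList [p.2])))).map (fun p => p.1) ++ [(l.length : Int)]
      = pvCuts cs l := by simp [pvCuts, pvNm]
  simp only [hcuts]
  have hBzip : (pvCuts cs l).zip (pvCuts cs l).tail = pvPairs cs l := rfl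
  rw [hBzip]
  -- rewrite B's filter-map through the pair map F
  have hB : ((pvPairs cs l).filter (fun p => p.2 - p.1 - 1 > t)).map
        (fun p => PySem.List.slice l (some (p.1 + 1)) (some p.2))
      = (pvRuns cs l).filter (fun r => (r.length : Int) > t) := by
    have step1 : ((pvPairs cs l).map
          (fun p => (p.2 - p.1 - 1, PySem.List.slice l (some (p.1 + 1)) (some p.2)))).filter
          (fun q => q.1 > t)
        = ((pvPairs cs l).filter (fun p => p.2 - p.1 - 1 > t)).map
          (fun p => (p.2 - p.1 - 1, PySem.List.slice l (some (p.1 + 1)) (some p.2))) := by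
      rw [List.filter_map]; rfl
    have step2 : ((pvRuns cs l).map (fun r => ((r.length : Int), r))).filter (fun q => q.1 > t)
        = ((pvRuns cs l).filter (fun r => (r.length : Int) > t)).map
          (fun r => ((r.length : Int), r)) := by
      rw [List.filter_map]; rfl
    have := congrArg (List.filter (fun q : Int × List Char => q.1 > t)) hP
    rw [step1, step2] at this
    have := congrArg (List.map (Prod.snd : Int × List Char → List Char)) this
    simpa [List.map_map, Function.comp_def] using this
  -- both sides reduce to the same filtered runs, mapped to strings
  have hcomp : (fun p : Int × Int =>
        String.ofList (PySem.List.slice l (some (p.1 + 1)) (some p.2)))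
      = (fun r => String.ofList r)
        ∘ (fun p : Int × Int => PySem.List.slice l (some (p.1 + 1)) (some p.2)) := rfl
  rw [hA, hF, hcomp, ← List.map_map, hB]
  rcases hr : pvRuns cs l with _ | ⟨hd, tl⟩
  · exact absurd hr (pvRuns_ne_nil cs l)
  · simp [pvConsHead]
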